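-- pv_equiv track=rewrite | github.com/vphoa342/money_manager_ver2 | pythonProject/money_manager/money.py | edit_dict
-- ===== SOURCE A (Python) =====
-- def edit_dict(date, amount):
--     # create dict
--     dict_temp = {}
--
--     # add value for dict
--     for i in range(len(date)):
--         temp = date[i]
--         if dict_temp.get(temp) is None:
--             dict_temp[temp] = amount[i]
--         else:
--             dict_temp[temp] += amount[i]
--
--     # add zeros amount date
--     for date in range(1, 32):
--         if dict_temp.get(date) is None:
--             dict_temp[date] = 0
--     return dict_temp
-- ===== SOURCE B (Python) =====
-- def edit_dict(date, amount):
--     # group-by-key: for each distinct date (first-occurrence order), sum its amounts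
--     pairs = list(zip(date, amount))
--     result = {}
--     for d in dict.fromkeys(date):
--         result[d] = sum(a for x, a in pairs if x == d)
--     for d in range(1, 32):
--         result.setdefault(d, 0)
--     return result
-- ===== Notes on version B (the rewrite author's own statement) =====
-- stated objective: alternative
-- what changed: B replaces A's single-pass dict accumulation over indices by a group-by-key pass: it dedupes the dates (dict.fromkeys), computes each key's sum by filtering the zipped (date, amount) pairs, then zero-fills days 1..31 with setdefault.
import Mathlib
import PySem

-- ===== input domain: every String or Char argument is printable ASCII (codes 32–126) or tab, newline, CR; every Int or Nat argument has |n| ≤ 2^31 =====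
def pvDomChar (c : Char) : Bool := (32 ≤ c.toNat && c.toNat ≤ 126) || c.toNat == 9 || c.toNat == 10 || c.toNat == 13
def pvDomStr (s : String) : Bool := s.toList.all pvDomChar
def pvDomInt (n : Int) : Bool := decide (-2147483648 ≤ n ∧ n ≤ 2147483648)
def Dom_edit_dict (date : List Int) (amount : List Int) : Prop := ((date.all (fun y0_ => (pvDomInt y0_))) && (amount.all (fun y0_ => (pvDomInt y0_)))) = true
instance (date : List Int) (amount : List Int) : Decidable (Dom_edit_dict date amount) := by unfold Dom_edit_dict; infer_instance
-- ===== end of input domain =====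

-- B replaces A's single-pass dict accumulation by group-by-key: dedupe the dates, then sum each key's amounts from the zipped pairs (alternative decomposition, not faster).


-- ===== PORT A =====
def edit_dict (date : List Int) (amount : List Int) : List (Int × Int) :=
  let d1 := (PySem.List.pyRange 0 date.length 1).foldl (fun dict i =>
    let temp := PySem.List.pyGetD date i 0
    match dict.get? temp with
    | none => dict.insert temp (PySem.List.pyGetD amount i 0)
    | some v => dict.insert temp (v + PySem.List.pyGetD amount i 0)) (PySem.Dict.empty : PySem.Dict Int Int)
  let d2 := (PySem.List.pyRange 1 32 1).foldl (fun dict d =>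
    match dict.get? d with
    | none => dict.insert d 0
    | some _ => dict) d1
  d2.items

-- ===== PORT B =====
def edit_dict_alt (date : List Int) (amount : List Int) : List (Int × Int) :=
  let pairs := date.zip amount
  let res := (PySem.List.dedup date).foldl (fun dict k =>
    dict.insert k (((pairs.filter (fun p => p.1 == k)).map (·.2)).sum)) (PySem.Dict.empty : PySem.Dict Int Int)
  let res2 := (PySem.List.pyRange 1 32 1).foldl (fun dict d => dict.setdefault d 0) res
  res2.items

-- ===== PRECONDITION & SPEC =====
-- Pre_ excludes date lists longer than amount (A raises IndexError there).
def Pre_edit_dict (date : List Int) (amount : List Int) : Prop := date.length ≤ amount.length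
instance (date : List Int) (amount : List Int) : Decidable (Pre_edit_dict date amount) := by unfold Pre_edit_dict; infer_instance
def pvWitness_edit_dict : List Int × List Int := ([1, 1, 2, 40], [10, 5, 7, 3])


def Spec_edit_dict (date : List Int) (amount : List Int) (out : List (Int × Int)) : Prop := out = edit_dict_alt date amount
instance (date : List Int) (amount : List Int) (out : List (Int × Int)) : Decidable (Spec_edit_dict date amount out) := by unfold Spec_edit_dict; infer_instance

-- ===== CLAIM (what is proved, stated in full; the proofs are below) =====
def Claim_equal_edit_dict : Prop := ∀ (date : List Int) (amount : List Int), Dom_edit_dict date amount → Pre_edit_dict date amount → Spec_edit_dict date amount (edit_dict date amount)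

-- ===== LEMMAS AND PROOFS =====

-- A's index loop over two lists, read as a fold over the zipped lists (needs date no longer than amount).
theorem range_two_list_foldl {β : Type} (xs ys : List Int) (h : xs.length ≤ ys.length)
    (f : β → Int → Int → β) (init : β) :
    (List.range xs.length).foldl (fun acc k => f acc (xs.getD k 0) (ys.getD k 0)) init
      = (xs.zip ys).foldl (fun acc p => f acc p.1 p.2) init := by
  induction xs generalizing ys init with
  | nil => simp
  | cons x xs ih =>
      cases ys with
      | nil => simp at h
      | cons y ys =>
          simp only [List.length_cons, List.range_succ_eq_map, List.foldl_cons, List.foldl_map,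
            List.getD_cons_zero, List.getD_cons_succ, List.zip_cons_cons]
          exact ih ys (by simpa using h) (f init x y)

-- the accumulated dict's lookup after the modify loop is the sum of the matching pairs' amounts
theorem getD_foldl_modify_sum (l : List (Int × Int)) (d : PySem.Dict Int Int) (k : Int) :
    (l.foldl (fun d p => d.modify p.1 0 (· + p.2)) d).getD k 0
      = d.getD k 0 + ((l.filter (fun p => p.1 == k)).map (·.2)).sum := by
  induction l generalizing d with
  | nil => simp
  | cons p l ih =>
      simp only [List.foldl_cons, ih, List.filter_cons]
      by_cases hk : p.1 = k
      · simp [hk, PySem.Dict.getD_modify_self]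
        ring
      · simp [hk, PySem.Dict.getD_modify_of_ne _ _ _ (Ne.symm hk)]

-- A's accumulation step is the dict 'modify' combinator
theorem stepA_eq_modify (d : PySem.Dict Int Int) (k a : Int) :
    (match d.get? k with
     | none => d.insert k a
     | some v => d.insert k (v + a)) = d.modify k 0 (· + a) := by
  simp only [PySem.Dict.modify, PySem.Dict.getD_eq_get?_getD]
  cases d.get? k <;> simp

-- A's zero-fill step is setdefault
theorem stepFill_eq_setdefault (d : PySem.Dict Int Int) (k : Int) :
    (match d.get? k with
     | none => d.insert k 0
     | some _ => d) = d.setdefault k 0 := by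
  have hc := PySem.Dict.contains_eq_isSome_get? d k
  cases hg : d.get? k with
  | none =>
      have : d.contains k = false := by rw [hc, hg]; rfl
      simp [PySem.Dict.setdefault_of_not_contains _ _ this]
  | some v =>
      have : d.contains k = true := by rw [hc, hg]; rfl
      simp [PySem.Dict.setdefault_of_contains _ _ this]

-- the two first-phase dicts coincide
theorem phase1_eq (date amount : List Int) (h : date.length ≤ amount.length) :
    (PySem.List.pyRange 0 date.length 1).foldl (fun dict i =>
      let temp := PySem.List.pyGetD date i 0
      match dict.get? temp with
      | none => dict.insert temp (PySem.List.pyGetD amount i 0)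
      | some v => dict.insert temp (v + PySem.List.pyGetD amount i 0)) (PySem.Dict.empty : PySem.Dict Int Int)
    = (PySem.List.dedup date).foldl (fun dict k =>
        dict.insert k ((((date.zip amount).filter (fun p => p.1 == k)).map (·.2)).sum)) PySem.Dict.empty := by
  have hzip : (PySem.List.pyRange 0 date.length 1).foldl (fun dict i =>
      let temp := PySem.List.pyGetD date i 0
      match dict.get? temp with
      | none => dict.insert temp (PySem.List.pyGetD amount i 0)
      | some v => dict.insert temp (v + PySem.List.pyGetD amount i 0)) (PySem.Dict.empty : PySem.Dict Int Int)
      = (date.zip amount).foldl (fun d p => d.modify p.1 0 (· + p.2)) PySem.Dict.empty := by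
    rw [PySem.List.pyRange_zero_nat]
    rw [List.foldl_map]
    have := range_two_list_foldl date amount h
      (fun (dict : PySem.Dict Int Int) t a =>
        match dict.get? t with
        | none => dict.insert t a
        | some v => dict.insert t (v + a)) PySem.Dict.empty
    simp only [PySem.List.pyGetD_natCast] at *
    rw [this]
    have hfe : (fun (d : PySem.Dict Int Int) (p : Int × Int) =>
        match d.get? p.1 with
        | none => d.insert p.1 p.2
        | some v => d.insert p.1 (v + p.2))
      = fun (d : PySem.Dict Int Int) (p : Int × Int) => d.modify p.1 0 (· + p.2) := by
      funext d p
      exact stepA_eq_modify d p.1 p.2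
    rw [hfe]
  rw [hzip]
  -- both sides are dicts; compare items
  apply PySem.Dict.ext
  have hndL : ((date.zip amount).foldl (fun d p => d.modify p.1 0 (· + p.2)) (PySem.Dict.empty : PySem.Dict Int Int)).keys.Nodup := by
    apply PySem.Dict.nodup_keys_foldl_modify_key
    simp
  have hkeysL : ((date.zip amount).foldl (fun d p => d.modify p.1 0 (· + p.2)) (PySem.Dict.empty : PySem.Dict Int Int)).keys
      = PySem.List.dedup date := by
    rw [PySem.Dict.keys_foldl_modify_key]
    simp only [PySem.Dict.keys_empty, PySem.Set.update_nil_left, List.map_fst_zip h]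
    simp
  rw [PySem.Dict.items_eq_map_keys _ hndL 0, hkeysL]
  rw [PySem.Dict.items_foldl_insert_fresh (PySem.List.dedup date) (fun k => k) _ _
        (by intro a _; simp) (by simp)]
  rw [show (PySem.Dict.empty : PySem.Dict Int Int).items ++ List.map (fun a => (a, ((((date.zip amount).filter (fun p => p.1 == a)).map (fun x => x.2)).sum))) (PySem.List.dedup date) = List.map (fun a => (a, ((((date.zip amount).filter (fun p => p.1 == a)).map (fun x => x.2)).sum))) (PySem.List.dedup date) from rfl]
  apply List.map_congr_left
  intro k _
  simp [getD_foldl_modify_sum]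

-- ===== VERDICT (by name: the statement is the Claim_ definition above) =====
theorem edit_dict_spec : Claim_equal_edit_dict := by
  intro date amount _ hpre
  unfold Spec_edit_dict edit_dict edit_dict_alt
  rw [phase1_eq date amount hpre]
  have hfe : (fun (dict : PySem.Dict Int Int) (d : Int) =>
      match dict.get? d with
      | none => dict.insert d 0
      | some _ => dict)
    = fun (dict : PySem.Dict Int Int) (d : Int) => dict.setdefault d 0 := by
    funext dict d
    exact stepFill_eq_setdefault dict d
  rw [hfe]
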